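-- pv_equiv track=rewrite | github.com/brycekl/IRD | data_utils/cope_1posture_anno.py | check_titai
-- ===== SOURCE A (Python) =====
-- def check_titai(all_titai):
--     """
--     检查改文件夹是否还有12种体态信息
--     :return:
--     """
--     exist = {12: 'B3', 13: 'U3', 14: 'U5', 15: 'UE'}
--     titais = list(all_titai.values())
--     for temp in titais:
--         if len(temp) == 2:
--             posture, position = temp
--             if posture == 9 and position in exist:
--                 exist.pop(position)
--     if exist:
--         return list(exist.values())
--     return False
-- ===== SOURCE B (Python) =====
-- def check_titai(all_titai):
--     """
--     检查改文件夹是否还有12种体态信息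
--     :return:
--     """
--     exist = {12: 'B3', 13: 'U3', 14: 'U5', 15: 'UE'}
--     values = list(all_titai.values())
--     remaining = [name for key, name in exist.items()
--                  if not any(len(t) == 2 and t[0] == 9 and t[1] == key for t in values)]
--     return remaining or False
-- ===== Notes on version B (the rewrite author's own statement) =====
-- stated objective: simpler
-- what changed: B inverts the traversal: instead of one data pass that mutates the table by popping found keys, it loops over the four fixed keys and does an any() membership scan of the data for each, so no mutation or accumulator exists at all
import Mathlib
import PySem

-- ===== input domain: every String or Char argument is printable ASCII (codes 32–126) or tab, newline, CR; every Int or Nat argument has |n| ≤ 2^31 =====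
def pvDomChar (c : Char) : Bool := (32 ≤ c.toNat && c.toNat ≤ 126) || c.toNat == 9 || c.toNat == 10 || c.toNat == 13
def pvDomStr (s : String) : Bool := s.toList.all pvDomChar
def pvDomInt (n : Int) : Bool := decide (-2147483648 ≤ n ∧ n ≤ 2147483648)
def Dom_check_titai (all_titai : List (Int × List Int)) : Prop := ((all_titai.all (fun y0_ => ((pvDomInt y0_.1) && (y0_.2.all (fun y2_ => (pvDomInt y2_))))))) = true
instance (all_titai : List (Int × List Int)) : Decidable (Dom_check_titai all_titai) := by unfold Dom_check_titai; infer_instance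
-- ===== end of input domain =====

-- B inverts the traversal: it loops over the four fixed keys and scans the data with an
-- any()-membership test per key, instead of A's single data pass that pops keys from a
-- mutated table (simpler: no mutation, no accumulator).


-- ===== PORT A =====
-- loop body of A: 'len(temp) == 2' + unpacking is the two-element pattern of the match;
-- 'exist.pop(position)' under the 'position in exist' guard is 'erase'
def checkStepA (ex : PySem.Dict Int String) (temp : List Int) : PySem.Dict Int String :=
  match temp with
  | [posture, position] =>
      if posture == 9 && ex.contains position then ex.erase position else ex
  | _ => ex

def check_titai (all_titai : List (Int × List Int)) : Option (List String) :=
  let exist : PySem.Dict Int String :=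
    PySem.Dict.ofList [(12, "B3"), (13, "U3"), (14, "U5"), (15, "UE")]
  let titais : List (List Int) := all_titai.map (·.2)
  let exist := titais.foldl checkStepA exist
  if exist.size ≠ 0 then some exist.values else none

-- ===== PORT B =====
-- 'any(len(t) == 2 and t[0] == 9 and t[1] == key for t in values)'; t[0]/t[1] are pyGet?
def hasPosture9 (values : List (List Int)) (key : Int) : Bool :=
  values.any (fun t =>
    decide (t.length = 2) && (PySem.List.pyGet? t 0 == some 9)
      && (PySem.List.pyGet? t 1 == some key))

def check_titai_alt (all_titai : List (Int × List Int)) : Option (List String) :=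
  let exist : List (Int × String) := [(12, "B3"), (13, "U3"), (14, "U5"), (15, "UE")]
  let values : List (List Int) := all_titai.map (·.2)
  let remaining := (exist.filter (fun kv => !hasPosture9 values kv.1)).map (·.2)
  if remaining ≠ [] then some remaining else none

-- ===== PRECONDITION & SPEC =====
def Spec_check_titai (all_titai : List (Int × List Int)) (out : Option (List String)) : Prop := out = check_titai_alt all_titai
instance (all_titai : List (Int × List Int)) (out : Option (List String)) : Decidable (Spec_check_titai all_titai out) := by unfold Spec_check_titai; infer_instance

-- ===== CLAIM (what is proved, stated in full; the proofs are below) =====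
def Claim_equal_check_titai : Prop := ∀ (all_titai : List (Int × List Int)), Dom_check_titai all_titai → Spec_check_titai all_titai (check_titai all_titai)

-- ===== LEMMAS AND PROOFS =====

/-- The positions A's loop removes: second component of each 2-element value whose first
component is 9. -/
def pvFound (l : List (List Int)) : List Int :=
  l.filterMap (fun temp =>
    match temp with
    | [posture, position] => if posture == 9 then some position else none
    | _ => none)

lemma pvFound_cons_hit (q : Int) (rest : List (List Int)) :
    pvFound ([(9 : Int), q] :: rest) = q :: pvFound rest := by
  simp [pvFound]

lemma pvFoundA_items (l : List (List Int)) (d : PySem.Dict Int String) :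
    (l.foldl checkStepA d).items
    = d.items.filter (fun kv => decide (kv.1 ∉ pvFound l)) := by
  induction l generalizing d with
  | nil => simp [pvFound]
  | cons t rest ih =>
    rw [List.foldl_cons]
    match t with
    | [] => simpa [pvFound, checkStepA] using ih d
    | [a] => simpa [pvFound, checkStepA] using ih d
    | a :: b :: c :: r => simpa [pvFound, checkStepA] using ih d
    | [p, q] =>
      by_cases hp : p = 9
      · subst hp
        rw [pvFound_cons_hit]
        by_cases hc : d.contains q = true
        · rw [show checkStepA d [(9 : Int), q] = d.erase q by simp [checkStepA, hc]]
          rw [ih]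
          show (List.filter _ (d.items.filter _)) = _
          rw [List.filter_filter]
          apply List.filter_congr
          intro kv _
          by_cases h1 : kv.1 = q <;> simp [h1]
        · rw [show checkStepA d [(9 : Int), q] = d by simp [checkStepA, hc]]
          rw [ih]
          apply List.filter_congr
          intro kv hkv
          have hne : kv.1 ≠ q := by
            intro h
            have h2 : ∀ (x : String), (q, x) ∉ d.items := by
              simpa [PySem.Dict.contains] using hc
            have h3 : (kv.1, kv.2) ∈ d.items := by simpa using hkv
            rw [h] at h3
            exact h2 kv.2 h3
          simp [hne]
      · rw [show checkStepA d [p, q] = d by simp [checkStepA, hp]]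
        rw [ih]
        have hf : pvFound ([p, q] :: rest) = pvFound rest := by
          simp [pvFound, hp]
        rw [hf]

/-- B's per-key scan finds exactly the positions A's loop removes. -/
lemma hasPosture9_iff (values : List (List Int)) (k : Int) :
    hasPosture9 values k = true ↔ k ∈ pvFound values := by
  induction values with
  | nil => simp [hasPosture9, pvFound]
  | cons t rest ih =>
    rw [show hasPosture9 (t :: rest) k
        = ((decide (t.length = 2) && (PySem.List.pyGet? t 0 == some 9)
            && (PySem.List.pyGet? t 1 == some k)) || hasPosture9 rest k) by
      simp [hasPosture9]]
    match t with
    | [] => simpa [pvFound, PySem.List.pyGet?, PySem.List.pyIdx?] using ih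
    | [a] => simpa [pvFound, PySem.List.pyGet?, PySem.List.pyIdx?] using ih
    | a :: b :: c :: r => simpa [pvFound, PySem.List.pyGet?, PySem.List.pyIdx?] using ih
    | [p, q] =>
      by_cases hp : p = 9
      · subst hp
        rw [pvFound_cons_hit]
        simp [PySem.List.pyGet?, PySem.List.pyIdx?, ih]
        tauto
      · have hf : pvFound ([p, q] :: rest) = pvFound rest := by simp [pvFound, hp]
        rw [hf]
        simp [PySem.List.pyGet?, PySem.List.pyIdx?, hp, ih]

-- ===== VERDICT (by name: the statement is the Claim_ definition above) =====
theorem check_titai_spec : Claim_equal_check_titai := by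
  intro all_titai _
  unfold Spec_check_titai check_titai check_titai_alt
  simp only [PySem.Dict.size, PySem.Dict.values]
  rw [pvFoundA_items]
  have hbase : (PySem.Dict.ofList [((12:Int), "B3"), (13, "U3"), (14, "U5"), (15, "UE")]).items
      = [((12:Int), "B3"), (13, "U3"), (14, "U5"), (15, "UE")] := by decide
  rw [hbase]
  have hfilter :
      ([((12:Int), "B3"), (13, "U3"), (14, "U5"), (15, "UE")].filter
        (fun kv => decide (kv.1 ∉ pvFound (all_titai.map (·.2)))))
      = ([((12:Int), "B3"), (13, "U3"), (14, "U5"), (15, "UE")].filter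
        (fun kv => !hasPosture9 (all_titai.map (·.2)) kv.1)) := by
    apply List.filter_congr
    intro kv _
    by_cases hm : kv.1 ∈ pvFound (all_titai.map (·.2))
    · simp [hm, (hasPosture9_iff _ _).mpr hm]
    · have : ¬ hasPosture9 (all_titai.map (·.2)) kv.1 = true := by
        rw [hasPosture9_iff]; exact hm
      simp [hm, this]
  rw [hfilter]
  rcases hfl : ([((12:Int), "B3"), (13, "U3"), (14, "U5"), (15, "UE")].filter
        (fun kv => !hasPosture9 (all_titai.map (·.2)) kv.1)) with
    _ | ⟨h, t⟩ <;> simp
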